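-- pv_equiv track=rewrite | github.com/ayushman-roy/solved | google_venkat/question_1.py | set_bit_count
-- ===== SOURCE A (Python) =====
-- def set_bit_count(k):
--     prev_sum, curr_sum = 0, 0
--     curr_value, iter_var = 1, 1
--     while (curr_value <= k+1):
--         prev_sum = curr_sum
--         iter_var = curr_value
--         while (iter_var != 0):
--             if (iter_var & 1 == 1):
--                 curr_sum += 1
--             iter_var = iter_var >> 2
--         curr_value += 1
--     return prev_sum, curr_sum
-- ===== SOURCE B (Python) =====
-- def set_bit_count(k):
--     def S(m):
--         # sum over v in 1..m of the number of set bits of v at even positions,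
--         # computed per bit position in O(log m)
--         if m < 0:
--             return 0
--         total = 0
--         p = 0
--         while (1 << p) <= m:
--             block = 1 << (p + 1)
--             half = 1 << p
--             total += (m + 1) // block * half + max(0, (m + 1) % block - half)
--             p += 2
--         return total
--     return S(k), S(k + 1)
-- ===== Notes on version B (the rewrite author's own statement) =====
-- stated objective: faster
-- what changed: A sums, for every number in the range, its even-position set bits with an inner bit loop; B instead counts, per even bit position, how many numbers in the range have that bit set via a closed-form quotient/remainder formula, summing over logarithmically many positions.
import Mathlib
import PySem

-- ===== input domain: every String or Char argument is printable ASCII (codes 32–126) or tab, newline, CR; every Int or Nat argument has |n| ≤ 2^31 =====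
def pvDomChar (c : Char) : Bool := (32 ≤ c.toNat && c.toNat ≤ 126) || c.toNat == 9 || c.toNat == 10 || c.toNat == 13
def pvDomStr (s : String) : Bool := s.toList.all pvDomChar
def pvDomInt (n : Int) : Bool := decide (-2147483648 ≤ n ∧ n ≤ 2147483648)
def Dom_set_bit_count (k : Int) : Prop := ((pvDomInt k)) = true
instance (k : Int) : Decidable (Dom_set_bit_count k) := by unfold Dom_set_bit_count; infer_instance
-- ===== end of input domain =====

-- B replaces A·s per-number inner bit loop by a per-bit-position counting formula
-- (objective: faster, O(log k) instead of O(k log k)); return value equivalence proved below.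

-- ===== PORT A =====
-- inner while loop of A: counts the set bits of n at the even positions (iter_var >>= 2)
def pvInnerA (n : Nat) : Nat :=
  if h : n = 0 then 0
  else (if n % 2 = 1 then 1 else 0) + pvInnerA (n / 4)
termination_by n
decreasing_by exact Nat.div_lt_self (Nat.pos_of_ne_zero h) (by norm_num)

-- outer while loop of A: one step per successive value of curr_value
def pvGoA : Nat → Nat → Int → Int → Int × Int
  | 0, _, prev, curr => (prev, curr)
  | n+1, cv, _, curr => pvGoA n (cv+1) curr (curr + (pvInnerA cv : Int))

def set_bit_count (k : Int) : List Int :=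
  let r := pvGoA (k+1).toNat 1 0 0
  [r.1, r.2]

-- ===== PORT B =====
-- one term of B's loop: count of v in [0..m] with bit p set
def pvCntTerm (m : Int) (p : Nat) : Int :=
  PySem.Int.floordiv (m+1) (2^(p+1)) * 2^p + max 0 (PySem.Int.mod (m+1) (2^(p+1)) - 2^p)

-- B's while loop over even bit positions p, p+2, …
def pvGoB (m : Int) (p : Nat) : Int :=
  if h : (2:Int)^p ≤ m then pvCntTerm m p + pvGoB m (p+2) else 0
termination_by m.toNat + 2 - p
decreasing_by
  have h1 : p < 2^p := Nat.lt_two_pow_self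
  have h2 : ((2^p : Nat) : Int) ≤ m := by push_cast; exact h
  have h3 : 2^p ≤ m.toNat := by omega
  omega

-- B's helper S(m)
def pvS (m : Int) : Int := if m < 0 then 0 else pvGoB m 0

def set_bit_count_alt (k : Int) : List Int := [pvS k, pvS (k+1)]

-- ===== PRECONDITION & SPEC =====
def Spec_set_bit_count (k : Int) (out : List Int) : Prop := out = set_bit_count_alt k
instance (k : Int) (out : List Int) : Decidable (Spec_set_bit_count k out) := by unfold Spec_set_bit_count; infer_instance

-- ===== CLAIM (what is proved, stated in full; the proofs are below) =====
def Claim_equal_set_bit_count : Prop := ∀ (k : Int), Dom_set_bit_count k → Spec_set_bit_count k (set_bit_count k)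

-- ===== LEMMAS AND PROOFS =====

lemma pvInnerA_zero : pvInnerA 0 = 0 := by rw [pvInnerA]; simp

lemma pvInnerA_eq (n : Nat) : pvInnerA n = n % 2 + pvInnerA (n / 4) := by
  rcases eq_or_ne n 0 with rfl | h
  · simp [pvInnerA_zero]
  · rw [pvInnerA, dif_neg h]
    rcases Nat.mod_two_eq_zero_or_one n with h2 | h2 <;> simp [h2]

-- sum of bit p over 0..M (Nat-valued)
def pvBitSum (M p : Nat) : Nat := ∑ v ∈ Finset.range (M+1), v / 2^p % 2

-- the counting formula equals the bit-column sum
lemma cnt_eq_bitSum (p M : Nat) :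
    (M+1) / 2^(p+1) * 2^p + ((M+1) % 2^(p+1) - 2^p) = pvBitSum M p := by
  induction M with
  | zero =>
    have h1 : 1 < 2^(p+1) := Nat.one_lt_two_pow (by omega)
    have h2 : (1:Nat) ≤ 2^p := Nat.one_le_two_pow
    simp [pvBitSum, Nat.div_eq_of_lt h1, Nat.mod_eq_of_lt h1]
    omega
  | succ M ih =>
    rw [pvBitSum, Finset.sum_range_succ, ← pvBitSum, ← ih]
    have hH : 0 < 2^p := Nat.two_pow_pos p
    have hB : 2^(p+1) = 2^p * 2 := by rw [pow_succ]
    rw [hB, ← Nat.mod_mul_right_div_self (M+1) (2^p) 2]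
    set H := 2^p with hHdef
    obtain ⟨q, r, hqr, hr⟩ : ∃ q r, M + 1 = (H*2)*q + r ∧ r < H*2 :=
      ⟨(M+1)/(H*2), (M+1)%(H*2), by rw [Nat.div_add_mod], Nat.mod_lt _ (by omega)⟩
    have hdiv1 : (M+1) / (H*2) = q := by
      rw [hqr, Nat.mul_add_div (by omega), Nat.div_eq_of_lt hr]; omega
    have hmod1 : (M+1) % (H*2) = r := by
      rw [hqr, Nat.mul_add_mod, Nat.mod_eq_of_lt hr]
    rcases Nat.lt_or_ge (r+1) (H*2) with hlt | hge
    · have hqr2 : M + 2 = (H*2)*q + (r+1) := by omega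
      have hdiv2 : (M+2) / (H*2) = q := by
        rw [hqr2, Nat.mul_add_div (by omega), Nat.div_eq_of_lt hlt]; omega
      have hmod2 : (M+2) % (H*2) = r + 1 := by
        rw [hqr2, Nat.mul_add_mod, Nat.mod_eq_of_lt hlt]
      rw [hdiv1, hmod1, hdiv2, hmod2]
      rcases Nat.lt_or_ge r H with hrH | hrH
      · rw [Nat.div_eq_of_lt hrH]; omega
      · have : r / H = 1 := by
          rw [Nat.div_eq_sub_div (by omega) hrH, Nat.div_eq_of_lt (by omega)]
        rw [this]; omega
    · have hre : r + 1 = H*2 := by omega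
      have hqr2 : M + 2 = (H*2)*(q+1) := by rw [Nat.mul_succ]; omega
      have hdiv2 : (M+2) / (H*2) = q + 1 := by
        rw [hqr2, Nat.mul_div_cancel_left _ (by omega : 0 < H*2)]
      have hmod2 : (M+2) % (H*2) = 0 := by
        rw [hqr2, Nat.mul_mod_right]
      rw [hdiv1, hmod1, hdiv2, hmod2]
      have hr1 : r / H = 1 := by
        rw [Nat.div_eq_sub_div (by omega) (by omega), Nat.div_eq_of_lt (by omega)]
      rw [hr1]
      have : (q+1)*H = q*H + H := by ring
      rw [this]; omega

-- cntTerm on a nonnegative integer is the Nat formula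
lemma cntTerm_cast (M p : Nat) :
    pvCntTerm (M : Int) p = (((M+1) / 2^(p+1) * 2^p + ((M+1) % 2^(p+1) - 2^p) : Nat) : Int) := by
  unfold pvCntTerm
  have h2 : (0:Int) < 2^(p+1) := by positivity
  rw [PySem.Int.floordiv_eq_ediv_of_pos h2, PySem.Int.mod_eq_emod_of_pos h2]
  have e1 : ((M:Int)+1) = ((M+1 : Nat) : Int) := by push_cast; ring
  have e2 : ((2:Int)^(p+1)) = ((2^(p+1) : Nat) : Int) := by push_cast; ring
  have e3 : ((2:Int)^p) = ((2^p : Nat) : Int) := by push_cast; ring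
  rw [e1, e2, e3, ← Int.natCast_div, ← Int.natCast_mod]
  have e4 : max 0 ((((M+1) % 2^(p+1) : Nat) : Int) - ((2^p : Nat) : Int))
      = (((M+1) % 2^(p+1) - 2^p : Nat) : Int) := by omega
  rw [e4, ← Int.natCast_mul, ← Int.natCast_add]

-- B-side invariant sum
def pvSB (M p : Nat) : Nat := ∑ v ∈ Finset.range (M+1), pvInnerA (v / 2^p)

lemma pvSB_zero_of_lt (M p : Nat) (h : M < 2^p) : pvSB M p = 0 := by
  unfold pvSB
  apply Finset.sum_eq_zero
  intro v hv
  rw [Finset.mem_range] at hv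
  rw [Nat.div_eq_of_lt (by omega), pvInnerA_zero]

lemma pvSB_step (M p : Nat) : pvSB M p = pvBitSum M p + pvSB M (p+2) := by
  unfold pvSB pvBitSum
  rw [← Finset.sum_add_distrib]
  apply Finset.sum_congr rfl
  intro v _
  rw [pvInnerA_eq (v / 2^p)]
  congr 1
  rw [Nat.div_div_eq_div_mul]
  congr 1
  rw [pow_add]
  norm_num

lemma goB_eq_aux (m : Int) (hm : 0 ≤ m) :
    ∀ (fuel p : Nat), m.toNat + 2 - p ≤ fuel → pvGoB m p = (pvSB m.toNat p : Int) := by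
  intro fuel
  induction fuel with
  | zero =>
    intro p hp
    have hlt : m.toNat < 2^p := by
      have : p < 2^p := Nat.lt_two_pow_self
      omega
    have hc : ¬ ((2:Int)^p ≤ m) := by
      intro hc
      have : ((2^p : Nat) : Int) ≤ m := by push_cast; exact hc
      omega
    rw [pvGoB, dif_neg hc, pvSB_zero_of_lt _ _ hlt]
    simp
  | succ fuel ih =>
    intro p hp
    by_cases hc : (2:Int)^p ≤ m
    · have hcN : 2^p ≤ m.toNat := by
        have : ((2^p : Nat) : Int) ≤ m := by push_cast; exact hc
        omega
      have hpM : p < 2^p := Nat.lt_two_pow_self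
      rw [pvGoB, dif_pos hc, ih (p+2) (by omega)]
      have hmM : m = ((m.toNat : Nat) : Int) := by omega
      have hct : pvCntTerm m p = (pvBitSum m.toNat p : Int) := by
        conv_lhs => rw [hmM]
        rw [cntTerm_cast m.toNat p, cnt_eq_bitSum p m.toNat]
      rw [hct, pvSB_step m.toNat p]
      push_cast
      ring
    · have hlt : m.toNat < 2^p := by
        have : ¬ (((2^p : Nat) : Int) ≤ m) := by push_cast; exact hc
        omega
      rw [pvGoB, dif_neg hc, pvSB_zero_of_lt _ _ hlt]
      simp

lemma goB_eq (m : Int) (hm : 0 ≤ m) (p : Nat) : pvGoB m p = (pvSB m.toNat p : Int) :=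
  goB_eq_aux m hm (m.toNat + 2 - p) p le_rfl

-- A-side invariant sum
def pvAN (t cv : Nat) : Nat := ∑ i ∈ Finset.range t, pvInnerA (cv + i)

lemma pvAN_shift (t cv : Nat) : pvAN (t+1) cv = pvInnerA cv + pvAN t (cv+1) := by
  unfold pvAN
  rw [Finset.sum_range_succ']
  have : ∀ i, pvInnerA (cv + (i+1)) = pvInnerA ((cv+1) + i) := by
    intro i; congr 1; omega
  simp only [this, Nat.add_zero]
  omega

lemma goA_eq (n : Nat) : ∀ (cv : Nat) (prev curr : Int),
    pvGoA (n+1) cv prev curr = (curr + (pvAN n cv : Int), curr + (pvAN (n+1) cv : Int)) := by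
  induction n with
  | zero =>
    intro cv prev curr
    simp [pvGoA, pvAN]
  | succ n ih =>
    intro cv prev curr
    show pvGoA (n+1) (cv+1) curr (curr + (pvInnerA cv : Int)) = _
    rw [ih (cv+1) curr (curr + (pvInnerA cv : Int))]
    rw [pvAN_shift n cv, pvAN_shift (n+1) cv]
    rw [Prod.mk.injEq]
    constructor <;> push_cast <;> ring

lemma pvSB_eq_pvAN (M : Nat) : pvSB M 0 = pvAN M 1 := by
  unfold pvSB pvAN
  simp only [pow_zero, Nat.div_one]
  rw [Finset.sum_range_succ']
  simp [pvInnerA_zero]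
  apply Finset.sum_congr rfl
  intro i _
  congr 1
  omega

-- ===== VERDICT (by name: the statement is the Claim_ definition above) =====
theorem set_bit_count_spec : Claim_equal_set_bit_count := by
  intro k _
  unfold Spec_set_bit_count set_bit_count set_bit_count_alt
  by_cases hk : 0 ≤ k
  · have h1 : (k+1).toNat = k.toNat + 1 := by omega
    have h2 : ¬ (k < 0) := by omega
    have h3 : ¬ (k + 1 < 0) := by omega
    rw [h1, goA_eq k.toNat 1 0 0]
    unfold pvS
    rw [if_neg h2, if_neg h3]
    rw [goB_eq k hk 0, goB_eq (k+1) (by omega) 0]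
    have h4 : (k+1).toNat = k.toNat + 1 := h1
    rw [h4, pvSB_eq_pvAN k.toNat, pvSB_eq_pvAN (k.toNat + 1)]
    simp
  · have h1 : (k+1).toNat = 0 := by omega
    rw [h1]
    unfold pvS
    rw [if_pos (by omega : k < 0)]
    rcases eq_or_lt_of_le (by omega : k ≤ -1) with he | hlt
    · subst he
      simp only [pvGoA]
      norm_num
      rw [pvGoB]
      norm_num
    · rw [if_pos (by omega : k + 1 < 0)]
      simp [pvGoA]
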